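-- pv_equiv track=rewrite | github.com/Intellexus-DSI/parallels-detection | sequence-matching/run.py | find_seeds
-- ===== SOURCE A (Python) =====
-- from collections import defaultdict
--
-- def build_kmer_index(text, k):
--     """
--     Build a dictionary mapping each k-mer to a list of start positions in `text`.
--     """
--     index = defaultdict(list)
--     for i in range(len(text) - k + 1):
--         kmer = text[i:i + k]
--         index[kmer].append(i)
--     return index
--
-- def find_seeds(dense_a, dense_b, k=15, max_kmer_hits=None):
--     """
--     Find all (pos_a, pos_b) pairs where dense_a[pos_a:pos_a+k] == dense_b[pos_b:pos_b+k].
--     If max_kmer_hits is set, skip k-mers that appear more than that many times.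
--     """
--     # Optimization: Build index on the shorter text to save RAM
--     if len(dense_a) <= len(dense_b):
--         short_text, long_text = dense_a, dense_b
--         swapped = False
--     else:
--         short_text, long_text = dense_b, dense_a
--         swapped = True
--
--     index = build_kmer_index(short_text, k)
--
--     # Pre-filter: remove k-mers that appear too many times in the short text
--     if max_kmer_hits:
--         index = {kmer: positions for kmer, positions in index.items()
--                  if len(positions) <= max_kmer_hits}
--
--     # Count k-mer frequencies in the long text to filter from that side too
--     if max_kmer_hits:
--         long_kmer_counts = defaultdict(int)
--         for j in range(len(long_text) - k + 1):
--             kmer = long_text[j:j + k]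
--             if kmer in index:
--                 long_kmer_counts[kmer] += 1
--         # Remove k-mers that appear too many times in the long text
--         for kmer, count in long_kmer_counts.items():
--             if count > max_kmer_hits:
--                 del index[kmer]
--
--     seeds = []
--     for j in range(len(long_text) - k + 1):
--         kmer = long_text[j:j + k]
--         if kmer in index:
--             for i in index[kmer]:
--                 if swapped:
--                     seeds.append((j, i))
--                 else:
--                     seeds.append((i, j))
--
--     seeds.sort()
--     return seeds
-- ===== SOURCE B (Python) =====
-- from collections import Counter
--
-- def find_seeds(dense_a, dense_b, k=15, max_kmer_hits=None):
--     """
--     Brute-force product scan: emit every (i, j) with dense_a[i:i+k] == dense_b[j:j+k].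
--     With max_kmer_hits set, a k-mer is kept only if it occurs at most that many
--     times in EACH text (counts taken once with Counter).  Since i ascends and j
--     ascends, the pairs come out already in sorted (lexicographic) order.
--     """
--     ra = range(len(dense_a) - k + 1)
--     rb = range(len(dense_b) - k + 1)
--     if max_kmer_hits:
--         ca = Counter(dense_a[x:x + k] for x in ra)
--         cb = Counter(dense_b[y:y + k] for y in rb)
--         ok = lambda kmer: ca[kmer] <= max_kmer_hits and cb[kmer] <= max_kmer_hits
--     else:
--         ok = lambda kmer: True
--     return [(i, j) for i in ra if ok(dense_a[i:i + k])
--             for j in rb if dense_a[i:i + k] == dense_b[j:j + k]]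
-- ===== Notes on version B (the rewrite author's own statement) =====
-- stated objective: simpler
-- what changed: Replaces the short/long swap, hash index on the shorter text, two-stage frequency pre-filtering with deletions, and final sort by one direct product scan that emits matching (i, j) pairs already in lexicographic order, with a single symmetric Counter-based frequency test.
import Mathlib
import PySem

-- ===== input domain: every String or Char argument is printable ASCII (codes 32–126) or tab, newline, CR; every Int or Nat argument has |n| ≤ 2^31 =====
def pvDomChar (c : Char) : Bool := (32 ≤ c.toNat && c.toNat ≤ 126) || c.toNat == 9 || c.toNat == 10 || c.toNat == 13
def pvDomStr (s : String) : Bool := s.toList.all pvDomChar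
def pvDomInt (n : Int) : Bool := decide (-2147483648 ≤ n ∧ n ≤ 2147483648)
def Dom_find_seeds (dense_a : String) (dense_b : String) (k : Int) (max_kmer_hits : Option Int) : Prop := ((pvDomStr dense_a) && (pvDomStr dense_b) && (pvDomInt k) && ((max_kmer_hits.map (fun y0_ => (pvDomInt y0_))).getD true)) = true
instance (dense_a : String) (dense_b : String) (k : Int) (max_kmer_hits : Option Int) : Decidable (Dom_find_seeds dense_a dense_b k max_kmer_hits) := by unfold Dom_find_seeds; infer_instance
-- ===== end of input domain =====

-- B replaces A's short/long swap + k-mer hash index + two-stage frequency filter + final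
-- sort by a plain product scan (with one symmetric Counter test) that emits the matching
-- (i, j) pairs already in lexicographic order; simpler, not faster.

-- ===== PORT A =====

-- text[i:i+k]
def pvKmer (text : List Char) (k : Int) (i : Int) : List Char :=
  PySem.List.slice text (some i) (some (i + k))

-- range(len(text) - k + 1)
def pvRng (text : List Char) (k : Int) : List Int :=
  PySem.List.pyRange 0 ((text.length : Int) - k + 1)

def build_kmer_index (text : List Char) (k : Int) : PySem.Dict (List Char) (List Int) :=
  (pvRng text k).foldl
    (fun d i => d.modify (pvKmer text k i) [] (fun l => l ++ [i])) PySem.Dict.empty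

-- body of find_seeds after the short/long assignment
def pvFind (short_text : List Char) (long_text : List Char) (k : Int)
    (max_kmer_hits : Option Int) (swapped : Bool) : List (Int × Int) :=
  let index0 := build_kmer_index short_text k
  -- if max_kmer_hits: {kmer: positions for … if len(positions) <= max_kmer_hits}
  let index1 : PySem.Dict (List Char) (List Int) :=
    match max_kmer_hits with
    | some m =>
        if m ≠ 0 then
          PySem.Dict.ofList (index0.items.filter (fun p => decide ((p.2.length : Int) ≤ m)))
        else index0
    | none => index0
  -- if max_kmer_hits: count k-mers of the long text that hit the index, delete frequent ones
  let index2 : PySem.Dict (List Char) (List Int) :=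
    match max_kmer_hits with
    | some m =>
        if m ≠ 0 then
          let counts := (pvRng long_text k).foldl
            (fun d j =>
              if index1.contains (pvKmer long_text k j) then
                d.modify (pvKmer long_text k j) 0 (fun c => c + 1)
              else d) PySem.Dict.empty
          counts.items.foldl (fun d p => if p.2 > m then d.erase p.1 else d) index1
        else index1
    | none => index1
  let seeds := (pvRng long_text k).foldl
    (fun acc j =>
      if index2.contains (pvKmer long_text k j) then
        acc ++ (index2.getD (pvKmer long_text k j) []).map
          (fun i => if swapped then (j, i) else (i, j))
      else acc) []
  PySem.List.sorted2 seeds (fun p => p.1) (fun p => p.2)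

def find_seeds (dense_a : String) (dense_b : String) (k : Int) (max_kmer_hits : Option Int) : List (Int × Int) :=
  if (dense_a.toList.length : Int) ≤ (dense_b.toList.length : Int) then
    pvFind dense_a.toList dense_b.toList k max_kmer_hits false
  else
    pvFind dense_b.toList dense_a.toList k max_kmer_hits true

-- ===== PORT B =====

def find_seeds_alt (dense_a : String) (dense_b : String) (k : Int) (max_kmer_hits : Option Int) : List (Int × Int) :=
  let a := dense_a.toList
  let b := dense_b.toList
  let ra := PySem.List.pyRange 0 ((a.length : Int) - k + 1)
  let rb := PySem.List.pyRange 0 ((b.length : Int) - k + 1)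
  let ok : List Char → Bool :=
    match max_kmer_hits with
    | some m =>
        if m ≠ 0 then
          let ca := PySem.Dict.counter (ra.map (fun x => pvKmer a k x))
          let cb := PySem.Dict.counter (rb.map (fun y => pvKmer b k y))
          fun kmer => decide (ca.getD kmer 0 ≤ m) && decide (cb.getD kmer 0 ≤ m)
        else fun _ => true
    | none => fun _ => true
  (ra.filter (fun i => ok (pvKmer a k i))).flatMap (fun i =>
    (rb.filter (fun j => pvKmer a k i == pvKmer b k j)).map (fun j => (i, j)))

-- ===== PRECONDITION & SPEC =====
def Spec_find_seeds (dense_a : String) (dense_b : String) (k : Int) (max_kmer_hits : Option Int) (out : List (Int × Int)) : Prop := out = find_seeds_alt dense_a dense_b k max_kmer_hits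
instance (dense_a : String) (dense_b : String) (k : Int) (max_kmer_hits : Option Int) (out : List (Int × Int)) : Decidable (Spec_find_seeds dense_a dense_b k max_kmer_hits out) := by unfold Spec_find_seeds; infer_instance

-- ===== CLAIM (what is proved, stated in full; the proofs are below) =====
def Claim_equal_find_seeds : Prop := ∀ (dense_a : String) (dense_b : String) (k : Int) (max_kmer_hits : Option Int), Dom_find_seeds dense_a dense_b k max_kmer_hits → Spec_find_seeds dense_a dense_b k max_kmer_hits (find_seeds dense_a dense_b k max_kmer_hits)

-- ===== LEMMAS AND PROOFS =====

-- number of occurrences of k-mer c in text t, as an Int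
def pvCnt (t : List Char) (k : Int) (c : List Char) : Int :=
  ((pvRng t k).countP (fun i => pvKmer t k i == c) : Int)

-- the frequency filter both programs implement (truthy max_kmer_hits only)
def pvOk (a b : List Char) (k : Int) (mm : Option Int) (c : List Char) : Bool :=
  match mm with
  | some m => if m ≠ 0 then decide (pvCnt a k c ≤ m) && decide (pvCnt b k c ≤ m) else true
  | none => true

-- canonical product-scan form (B's shape)
def pvBform (a b : List Char) (k : Int) (mm : Option Int) : List (Int × Int) :=
  (pvRng a k).flatMap (fun i =>
    ((pvRng b k).filter (fun j => pvKmer a k i == pvKmer b k j && pvOk a b k mm (pvKmer a k i))).map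
      (fun j => (i, j)))

lemma okP_comm (a b : List Char) (k : Int) (mm : Option Int) (c : List Char) :
    pvOk b a k mm c = pvOk a b k mm c := by
  cases mm with
  | none => rfl
  | some m => by_cases h : m = 0 <;> simp [pvOk, h, Bool.and_comm]

lemma filter_flatMap {α β : Type} (l : List α) (P : α → Bool) (g g' : α → List β)
    (hg : ∀ i, P i = true → g i = g' i) (hg0 : ∀ i, P i = false → g' i = []) :
    (l.filter P).flatMap g = l.flatMap g' := by
  induction l with
  | nil => rfl
  | cons x t ih =>
      by_cases hx : P x
      · rw [List.filter_cons_of_pos hx, List.flatMap_cons, List.flatMap_cons, hg x hx, ih]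
      · rw [List.filter_cons_of_neg (by simpa using hx), List.flatMap_cons,
          hg0 x (by simpa using hx), ih, List.nil_append]

lemma B_eq (da db : String) (k : Int) (mm : Option Int) :
    find_seeds_alt da db k mm = pvBform da.toList db.toList k mm := by
  have h1 : find_seeds_alt da db k mm =
      ((pvRng da.toList k).filter
        (fun i => pvOk da.toList db.toList k mm (pvKmer da.toList k i))).flatMap
        (fun i => ((pvRng db.toList k).filter
          (fun j => pvKmer da.toList k i == pvKmer db.toList k j)).map (fun j => (i, j))) := by
    cases mm with
    | none => rfl
    | some m =>
        by_cases h : m = 0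
        · simp [find_seeds_alt, pvOk, pvRng, h]
        · simp [find_seeds_alt, pvOk, pvCnt, pvRng, h, PySem.Dict.getD_counter,
            List.count_eq_countP, List.countP_map, Function.comp_def]
  rw [h1]
  unfold pvBform
  refine filter_flatMap _ _ _ _ ?_ ?_
  · intro i hok
    congr 1
    apply List.filter_congr
    intro j _
    rw [hok, Bool.and_true]
  · intro i hok
    simp [hok]

-- ===== dictionary characterizations (A side) =====

lemma bki_getD (s : List Char) (k : Int) (c : List Char) :
    (build_kmer_index s k).getD c [] = (pvRng s k).filter (fun i => pvKmer s k i == c) := by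
  unfold build_kmer_index
  rw [show ((pvRng s k).foldl (fun d i => d.modify (pvKmer s k i) [] (fun l => l ++ [i])) PySem.Dict.empty)
      = (((pvRng s k).map (fun i => (pvKmer s k i, i))).foldl
          (fun d p => d.modify p.1 [] (fun l => l ++ [p.2])) PySem.Dict.empty) from
    (List.foldl_map (f := fun i => (pvKmer s k i, i))
      (g := fun (d : PySem.Dict (List Char) (List Int)) (p : List Char × Int) => d.modify p.1 [] (fun l => l ++ [p.2]))).symm]
  rw [PySem.Dict.getD_foldl_modify_append]
  simp [List.filter_map, List.map_map, Function.comp_def]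

lemma bki_keys_nodup (s : List Char) (k : Int) : (build_kmer_index s k).keys.Nodup := by
  unfold build_kmer_index
  exact PySem.Dict.nodup_keys_foldl_modify_key _ _ _ _ _ (by simp)

lemma bki_get? (s : List Char) (k : Int) (c : List Char) :
    (build_kmer_index s k).get? c =
      if (pvRng s k).any (fun i => pvKmer s k i == c) then
        some ((pvRng s k).filter (fun i => pvKmer s k i == c))
      else none := by
  have hk : (build_kmer_index s k).keys = PySem.Set.ofList ((pvRng s k).map (pvKmer s k)) := by
    unfold build_kmer_index
    have := PySem.Dict.keys_foldl_modify_key (pvRng s k) (pvKmer s k) ([] : List Int)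
      (fun _ i => fun l => l ++ [i]) PySem.Dict.empty
    simpa [PySem.Set.ofList_eq_foldl, PySem.Set.update, PySem.Dict.keys_empty] using this
  by_cases hc : (pvRng s k).any (fun i => pvKmer s k i == c)
  · have hmem : c ∈ (build_kmer_index s k).keys := by
      rw [hk, PySem.Set.mem_ofList]
      simp only [List.any_eq_true, beq_iff_eq] at hc
      obtain ⟨i, hi, he⟩ := hc
      exact List.mem_map.mpr ⟨i, hi, he⟩
    have hne : (build_kmer_index s k).get? c ≠ none := by
      rw [Ne, PySem.Dict.get?_eq_none_iff_not_mem_keys]; exact fun h => h hmem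
    obtain ⟨v, hv⟩ := Option.ne_none_iff_exists'.mp hne
    have hg : (build_kmer_index s k).getD c [] = v := by
      simp [PySem.Dict.getD, hv]
    rw [hv, if_pos hc, ← bki_getD s k c, hg]
  · have hmem : c ∉ (build_kmer_index s k).keys := by
      rw [hk, PySem.Set.mem_ofList]
      intro hm
      obtain ⟨i, hi, he⟩ := List.mem_map.mp hm
      exact (by simpa using hc : ∀ i ∈ pvRng s k, ¬pvKmer s k i = c) i hi he
    rw [show (build_kmer_index s k).get? c = none from
      (PySem.Dict.get?_eq_none_iff_not_mem_keys _ _).mpr hmem, if_neg hc]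

-- first-match lookup through a filtered pair list with distinct keys
lemma find?_congr' {α : Type} (l : List α) (p q : α → Bool) (h : ∀ a ∈ l, p a = q a) :
    l.find? p = l.find? q := by
  induction l with
  | nil => rfl
  | cons a t ih =>
      have ha := h a (List.mem_cons_self ..)
      by_cases hp : p a
      · rw [List.find?_cons_of_pos (p := p) hp, List.find?_cons_of_pos (p := q) (ha ▸ hp)]
      · rw [List.find?_cons_of_neg (p := p) hp, List.find?_cons_of_neg (p := q) (ha ▸ hp)]
        exact ih (fun a ha => h a (List.mem_cons_of_mem _ ha))

-- first-match lookup through a filtered pair list with distinct keys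
lemma find?_and_nodup {κ ν : Type} [BEq κ] [LawfulBEq κ] (ps : List (κ × ν))
    (hnd : (ps.map Prod.fst).Nodup) (P : κ × ν → Bool) (c : κ) :
    ps.find? (fun p => P p && p.1 == c) =
      (ps.find? (fun p => p.1 == c)).bind (fun p => if P p then some p else none) := by
  induction ps with
  | nil => simp
  | cons q rest ih =>
      simp only [List.map_cons, List.nodup_cons] at hnd
      by_cases hq : q.1 == c
      · have hqc : q.1 = c := beq_iff_eq.mp hq
        have hrest : rest.find? (fun p => P p && p.1 == c) = none := by
          rw [List.find?_eq_none]
          intro p hp hcontra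
          simp only [Bool.and_eq_true, beq_iff_eq] at hcontra
          exact hnd.1 (by rw [hqc, ← hcontra.2]; exact List.mem_map.mpr ⟨p, hp, rfl⟩)
        by_cases hP : P q
        · rw [List.find?_cons_of_pos (p := fun p : κ × ν => P p && p.1 == c) (by simp [hP, hq]),
            List.find?_cons_of_pos (p := fun p : κ × ν => p.1 == c) hq]
          simp [hP]
        · rw [List.find?_cons_of_neg (p := fun p : κ × ν => P p && p.1 == c) (by simp [hP]),
            List.find?_cons_of_pos (p := fun p : κ × ν => p.1 == c) hq, hrest]
          simp [hP]
      · rw [List.find?_cons_of_neg (p := fun p : κ × ν => P p && p.1 == c) (by simp [hq]),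
          List.find?_cons_of_neg (p := fun p : κ × ν => p.1 == c) hq, ih hnd.2]

-- dict comprehension filtering a nodup-keyed dict
lemma ofList_filter_get? {κ ν : Type} [BEq κ] [LawfulBEq κ] (d : PySem.Dict κ ν)
    (hnd : d.keys.Nodup) (P : κ × ν → Bool) (c : κ) :
    (PySem.Dict.ofList (d.items.filter P)).get? c =
      (d.get? c).bind (fun v => if P (c, v) then some v else none) := by
  have hnd' : ((d.items.filter P).map Prod.fst).Nodup :=
    List.Nodup.sublist (List.Sublist.map Prod.fst List.filter_sublist) hnd
  have hofl : (PySem.Dict.ofList (d.items.filter P)).items = d.items.filter P := by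
    have := PySem.Dict.items_foldl_insert_fresh (d.items.filter P) Prod.fst Prod.snd
      PySem.Dict.empty (by intro a _; simp [PySem.Dict.contains_empty]) hnd'
    simpa [PySem.Dict.ofList, PySem.Dict.update] using this
  have key : (PySem.Dict.ofList (d.items.filter P)).get? c
      = (d.items.find? (fun p => P p && p.1 == c)).map (fun p => p.2) := by
    show Option.map _ (List.find? _ _) = _
    rw [hofl, List.find?_filter, find?_congr' _ _ (fun p => P p && p.1 == c) (by intro a _; simp)]
  rw [key, find?_and_nodup d.items hnd P c]
  cases hf : d.items.find? (fun p => p.1 == c) with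
  | none => simp [PySem.Dict.get?, hf]
  | some p =>
      obtain ⟨p1, p2⟩ := p
      have hpc : p1 = c := beq_iff_eq.mp (by simpa using List.find?_some hf)
      subst hpc
      by_cases hP : P (p1, p2) <;> simp [PySem.Dict.get?, hf, hP]

lemma get?_erase {κ ν : Type} [BEq κ] [LawfulBEq κ] (d : PySem.Dict κ ν) (x c : κ) :
    (d.erase x).get? c = if c == x then none else d.get? c := by
  show Option.map _ ((d.items.filter (fun p => !(p.1 == x))).find? (fun p => p.1 == c)) = _
  rw [List.find?_filter]
  by_cases hcx : c == x
  · have hc : c = x := beq_iff_eq.mp hcx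
    subst hc
    have hnone : d.items.find? (fun a => decide ((!a.1 == c) = true ∧ (a.1 == c) = true)) = none := by
      rw [List.find?_eq_none]
      intro p _
      simp
    rw [hnone]
    simp
  · have heq : d.items.find? (fun a => decide ((!a.1 == x) = true ∧ (a.1 == c) = true))
        = d.items.find? (fun p => p.1 == c) := by
      apply find?_congr'
      intro p _
      by_cases h : p.1 == c
      · have h' : p.1 = c := beq_iff_eq.mp h
        have hne : (p.1 == x) = false := by
          rw [beq_eq_false_iff_ne, h']
          exact fun hh => hcx (by simp [hh])
        simp [h, hne]
      · simp [h]
    rw [heq]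
    simp [PySem.Dict.get?, hcx]

lemma get?_foldl_erase {κ ν : Type} [BEq κ] [LawfulBEq κ] (m : Int)
    (ps : List (κ × Int)) (d : PySem.Dict κ ν) (c : κ) :
    ((ps.foldl (fun d p => if p.2 > m then d.erase p.1 else d) d).get? c) =
      if ps.any (fun p => p.1 == c && p.2 > m) then none else d.get? c := by
  induction ps generalizing d with
  | nil => simp
  | cons q rest ih =>
      simp only [List.foldl_cons, List.any_cons]
      by_cases hq2 : q.2 > m
      · rw [if_pos hq2, ih]
        by_cases hq1 : q.1 == c
        · have h1 : (c == q.1) = true := by rw [beq_iff_eq]; exact (beq_iff_eq.mp hq1).symm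
          simp [hq1, hq2, get?_erase, h1]
        · have h1 : (c == q.1) = false := by
            rw [beq_eq_false_iff_ne]
            exact fun h => hq1 (by simp [h])
          have hq1' : (q.1 == c) = false := by simpa using hq1
          simp only [hq1', Bool.false_and, Bool.false_or]
          split
          · rfl
          · rw [get?_erase, if_neg (by simp [h1])]
      · rw [if_neg hq2, ih]
        simp only [show decide (q.2 > m) = false from by simpa using hq2,
          Bool.and_false, Bool.false_or]

-- an order-insensitive scan of the items of a nodup-keyed dict
lemma any_items_eq {κ ν : Type} [BEq κ] [LawfulBEq κ] (d : PySem.Dict κ ν)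
    (hnd : d.keys.Nodup) (c : κ) (P : ν → Bool) :
    d.items.any (fun p => p.1 == c && P p.2) =
      (match d.get? c with | some v => P v | none => false) := by
  cases hf : d.get? c with
  | none =>
      rw [PySem.Dict.get?_eq_none_iff_not_mem_keys] at hf
      have hfa : d.items.any (fun p => p.1 == c && P p.2) = false := by
        rw [List.any_eq_false]
        rintro p hp hcontra
        simp only [Bool.and_eq_true, beq_iff_eq] at hcontra
        exact hf (hcontra.1 ▸ PySem.Dict.mem_keys_of_mem_items d hp)
      simp [hfa]
  | some v =>
      by_cases hP : P v
      · have : d.items.any (fun p => p.1 == c && P p.2) = true :=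
          List.any_eq_true.mpr ⟨(c, v),
            (PySem.Dict.get?_eq_some_iff_mem_items d c v hnd).mp hf, by simp [hP]⟩
        simp [this, hP]
      · have hfa : d.items.any (fun p => p.1 == c && P p.2) = false := by
          rw [List.any_eq_false]
          rintro ⟨p1, p2⟩ hp hcontra
          simp only [Bool.and_eq_true, beq_iff_eq] at hcontra
          have h2 := PySem.Dict.get?_of_mem_items d (hcontra.1 ▸ hp) hnd
          rw [hf] at h2
          exact hP (Option.some.inj h2 ▸ hcontra.2)
        simp [hfa, hP]

-- get? through keys and getD
lemma get?_of_keys_getD {κ ν : Type} [BEq κ] [LawfulBEq κ] (d : PySem.Dict κ ν) (c : κ) (v0 : ν) :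
    d.get? c = if c ∈ d.keys then some (d.getD c v0) else none := by
  by_cases h : c ∈ d.keys
  · obtain ⟨v, hv⟩ := Option.ne_none_iff_exists'.mp
      (fun hn => ((PySem.Dict.get?_eq_none_iff_not_mem_keys _ _).mp hn) h)
    rw [hv, if_pos h]
    simp [PySem.Dict.getD, hv]
  · rw [(PySem.Dict.get?_eq_none_iff_not_mem_keys _ _).mpr h, if_neg h]

-- the final dictionary of pvFind answers exactly the filtered-position query
lemma d2_get? (s l : List Char) (k : Int) (mm : Option Int) (c : List Char) :
    (let index0 := build_kmer_index s k
     let index1 : PySem.Dict (List Char) (List Int) :=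
       match mm with
       | some m =>
           if m ≠ 0 then
             PySem.Dict.ofList (index0.items.filter (fun p => decide ((p.2.length : Int) ≤ m)))
           else index0
       | none => index0
     let index2 : PySem.Dict (List Char) (List Int) :=
       match mm with
       | some m =>
           if m ≠ 0 then
             let counts := (pvRng l k).foldl
               (fun d j =>
                 if index1.contains (pvKmer l k j) then
                   d.modify (pvKmer l k j) 0 (fun c => c + 1)
                 else d) PySem.Dict.empty
             counts.items.foldl (fun d p => if p.2 > m then d.erase p.1 else d) index1
           else index1
       | none => index1
     index2.get? c) =
      if (pvRng s k).any (fun i => pvKmer s k i == c) && pvOk s l k mm c then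
        some ((pvRng s k).filter (fun i => pvKmer s k i == c)) else none := by
  cases mm with
  | none =>
      show (build_kmer_index s k).get? c = _
      rw [bki_get?]
      simp [pvOk]
  | some m =>
      by_cases h0 : m = 0
      · subst h0
        simp only [ne_eq, not_true_eq_false, if_false]
        rw [bki_get?]
        simp [pvOk]
      · simp only [ne_eq, h0, not_false_eq_true, if_true]
        set d0 := build_kmer_index s k with hd0
        set F := (pvRng s k).filter (fun i => pvKmer s k i == c) with hF
        set d1 := PySem.Dict.ofList (d0.items.filter (fun p => decide ((p.2.length : Int) ≤ m))) with hd1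
        set counts := (pvRng l k).foldl
          (fun (d : PySem.Dict (List Char) Int) j =>
            if d1.contains (pvKmer l k j) then d.modify (pvKmer l k j) 0 (fun c => c + 1) else d)
          PySem.Dict.empty with hcounts
        -- index1 lookup
        have h1 : d1.get? c = if ((pvRng s k).any (fun i => pvKmer s k i == c)
            && decide ((F.length : Int) ≤ m)) then some F else none := by
          rw [hd1, ofList_filter_get? d0 (bki_keys_nodup s k), bki_get?, ← hF]
          by_cases hA : (pvRng s k).any (fun i => pvKmer s k i == c)
          · simp only [hA, if_true, Bool.true_and, Option.bind_some]
          · simp [hA]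
        -- counts as a filtered fold
        have hcnt : counts = ((pvRng l k).filter (fun j => d1.contains (pvKmer l k j))).foldl
            (fun (d : PySem.Dict (List Char) Int) j => d.modify (pvKmer l k j) 0 (fun c => c + 1))
            PySem.Dict.empty := by
          rw [hcounts, PySem.List.foldl_if_eq_foldl_filter]
        set Lf := (pvRng l k).filter (fun j => d1.contains (pvKmer l k j)) with hLf
        have hck : counts.keys = PySem.Set.ofList (Lf.map (pvKmer l k)) := by
          rw [hcnt]
          have := PySem.Dict.keys_foldl_modify_key Lf (pvKmer l k) (0 : Int)
            (fun _ _ => fun c => c + 1) PySem.Dict.empty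
          simpa [PySem.Set.ofList_eq_foldl, PySem.Set.update, PySem.Dict.keys_empty] using this
        have hcknd : counts.keys.Nodup := by
          rw [hcnt]
          exact PySem.Dict.nodup_keys_foldl_modify_key _ _ _ _ _ (by simp)
        have hcgetD : counts.getD c 0 = ((Lf.map (pvKmer l k)).count c : Int) := by
          rw [hcnt]
          rw [show (Lf.foldl (fun (d : PySem.Dict (List Char) Int) j => d.modify (pvKmer l k j) 0 (fun c => c + 1)) PySem.Dict.empty)
              = ((Lf.map (pvKmer l k)).foldl (fun d x => d.modify x 0 (fun c => c + 1)) PySem.Dict.empty) from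
            (List.foldl_map (f := pvKmer l k)
              (g := fun (d : PySem.Dict (List Char) Int) (x : List Char) => d.modify x 0 (fun c => c + 1))).symm]
          rw [PySem.Dict.getD_foldl_modify_add_one]
          simp
        -- erase loop
        rw [get?_foldl_erase, any_items_eq counts hcknd c (fun v => decide (v > m)),
          get?_of_keys_getD counts c 0, h1]
        by_cases hA : (pvRng s k).any (fun i => pvKmer s k i == c)
        case neg =>
          simp only [hA, Bool.false_and, if_neg (Bool.false_ne_true)]
          split <;> split <;> simp
        case pos =>
        by_cases hFl : (F.length : Int) ≤ m
        case neg =>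
          have : ((pvRng s k).any (fun i => pvKmer s k i == c) && decide ((F.length : Int) ≤ m)) = false := by
            simp [hFl]
          rw [this]
          have hok : pvOk s l k (some m) c = false := by
            have : pvCnt s k c = (F.length : Int) := by
              rw [pvCnt, hF, List.countP_eq_length_filter]
            simp [pvOk, h0, this, hFl]
          rw [hok]
          simp only [Bool.and_false, if_neg (Bool.false_ne_true)]
          split <;> split <;> simp
        case pos =>
        have hAF : ((pvRng s k).any (fun i => pvKmer s k i == c) && decide ((F.length : Int) ≤ m)) = true := by
          simp [hA, hFl]
        rw [hAF]
        have hc1 : d1.contains c = true := by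
          rw [PySem.Dict.contains_eq_isSome_get?, h1, hAF]
          rfl
        -- count in the long filtered list equals the plain long count
        have hcc : ((Lf.map (pvKmer l k)).count c : Int) = pvCnt l k c := by
          rw [List.count_eq_countP, List.countP_map, hLf, List.countP_filter, pvCnt]
          congr 1
          apply List.countP_congr
          intro j _
          simp only [Function.comp_apply, Bool.and_eq_true, beq_iff_eq]
          constructor
          · rintro ⟨h1', -⟩; exact h1'
          · intro h1'; exact ⟨h1', by rw [h1']; exact hc1⟩
        have hcnt0 : (0 : Int) ≤ pvCnt l k c := by
          rw [pvCnt]; positivity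
        have hok : pvOk s l k (some m) c = decide (pvCnt l k c ≤ m) := by
          have hs : pvCnt s k c = (F.length : Int) := by
            rw [pvCnt, hF, List.countP_eq_length_filter]
          simp [pvOk, h0, hs, hFl]
        rw [hok]
        by_cases hmem : c ∈ counts.keys
        · rw [if_pos hmem]
          simp only [hcgetD, hcc]
          by_cases hgt : pvCnt l k c > m
          · simp [hgt, show ¬pvCnt l k c ≤ m by omega]
          · simp [show ¬pvCnt l k c > m from hgt, show pvCnt l k c ≤ m by omega, hA]
        · rw [if_neg hmem]
          -- c does not occur among the counted long k-mers: its long count is 0 ≤ m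
          have hzero : pvCnt l k c = 0 := by
            rw [← hcc]
            rw [hck, PySem.Set.mem_ofList] at hmem
            simpa [List.count_eq_zero] using hmem
          have hm0 : (0 : Int) ≤ m := le_trans (by positivity) hFl
          simp [hzero, hm0, show ∃ x ∈ pvRng s k, pvKmer s k x = c from by simpa using hA]

lemma seeds_foldl_eq (D : PySem.Dict (List Char) (List Int)) (s l : List Char) (k : Int)
    (ok : List Char → Bool)
    (hD : ∀ c, D.get? c =
      if ((pvRng s k).any (fun i => pvKmer s k i == c) && ok c) then
        some ((pvRng s k).filter (fun i => pvKmer s k i == c)) else none)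
    (pr : Int → Int → Int × Int) :
    ((pvRng l k).foldl (fun acc j =>
        if D.contains (pvKmer l k j) then
          acc ++ (D.getD (pvKmer l k j) []).map (fun i => pr i j)
        else acc) []) =
      (pvRng l k).flatMap (fun j =>
        ((pvRng s k).filter (fun i => pvKmer s k i == pvKmer l k j && ok (pvKmer l k j))).map
          (fun i => pr i j)) := by
  have hbody : ∀ (acc : List (Int × Int)) (j : Int),
      (if D.contains (pvKmer l k j) then
        acc ++ (D.getD (pvKmer l k j) []).map (fun i => pr i j)
      else acc) =
      acc ++ (((pvRng s k).filter (fun i => pvKmer s k i == pvKmer l k j && ok (pvKmer l k j))).map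
        (fun i => pr i j)) := by
    intro acc j
    have hc := hD (pvKmer l k j)
    by_cases hcond : ((pvRng s k).any (fun i => pvKmer s k i == pvKmer l k j) && ok (pvKmer l k j))
    · have hok : ok (pvKmer l k j) = true := (Bool.and_eq_true .. ▸ hcond).2
      have hcon : D.contains (pvKmer l k j) = true := by
        rw [PySem.Dict.contains_eq_isSome_get?, hc, if_pos hcond]
        rfl
      have hgd : D.getD (pvKmer l k j) [] =
          (pvRng s k).filter (fun i => pvKmer s k i == pvKmer l k j) := by
        rw [PySem.Dict.getD, hc, if_pos hcond]
        rfl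
      rw [if_pos hcon, hgd]
      congr 1
      congr 1
      apply List.filter_congr
      intro i _
      rw [hok, Bool.and_true]
    · have hcon : D.contains (pvKmer l k j) = false := by
        rw [PySem.Dict.contains_eq_isSome_get?, hc, if_neg hcond]
        rfl
      have hnil : (pvRng s k).filter (fun i => pvKmer s k i == pvKmer l k j && ok (pvKmer l k j)) = [] := by
        rw [List.filter_eq_nil_iff]
        intro i hi
        simp only [Bool.and_eq_true, not_and]
        intro hki hok
        exact hcond (by
          simp only [Bool.and_eq_true]
          exact ⟨List.any_eq_true.mpr ⟨i, hi, hki⟩, hok⟩)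
      rw [hcon, hnil]
      simp
  refine .trans (PySem.List.foldl_congr_mem (pvRng l k) _ (fun acc j =>
      acc ++ (((pvRng s k).filter
        (fun i => pvKmer s k i == pvKmer l k j && ok (pvKmer l k j))).map (fun i => pr i j))) []
    (fun acc x _ => hbody acc x)) ?_
  rw [PySem.List.foldl_append_eq_flatMap]
  simp

lemma pvFind_eq (s l : List Char) (k : Int) (mm : Option Int) (sw : Bool) :
    pvFind s l k mm sw =
      PySem.List.sorted2
        ((pvRng l k).flatMap (fun j =>
          ((pvRng s k).filter (fun i => pvKmer s k i == pvKmer l k j && pvOk s l k mm (pvKmer l k j))).map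
            (fun i => if sw then (j, i) else (i, j))))
        (fun p => p.1) (fun p => p.2) := by
  simp only [pvFind]
  congr 1
  exact seeds_foldl_eq _ s l k (pvOk s l k mm) (fun c => d2_get? s l k mm c)
    (fun i j => if sw then (j, i) else (i, j))

-- ===== shape lemmas =====

lemma nodup_pairs {l1 l2 : List Int} (q : Int → Int → Bool) (f : Int → Int → Int × Int)
    (hf : ∀ x y x' y', f x y = f x' y' → x = x' ∧ y = y')
    (h1 : l1.Nodup) (h2 : l2.Nodup) :
    (l1.flatMap (fun x => ((l2.filter (q x)).map (f x)))).Nodup := by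
  rw [List.nodup_flatMap]
  constructor
  · intro x _
    refine List.Nodup.map_on ?_ (h2.filter _)
    intro u _ v _ huv
    exact (hf x u x v huv).2
  · refine h1.imp ?_
    intro x y hxy p hp hq
    obtain ⟨u, -, hu⟩ := List.mem_map.mp hp
    obtain ⟨v, -, hv⟩ := List.mem_map.mp hq
    exact hxy ((hf x u y v (hu.trans hv.symm)).1)

lemma sorted2_pair_eq (xs ys : List (Int × Int)) (h : ys.Perm xs)
    (hp : ys.Pairwise (fun p q => p.1 < q.1 ∨ (p.1 = q.1 ∧ p.2 < q.2))) :
    PySem.List.sorted2 xs (fun p => p.1) (fun p => p.2) = ys := by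
  have hkey : PySem.List.sorted2 xs (fun p => p.1) (fun p => p.2)
      = PySem.List.sorted xs (fun p : Int × Int => toLex p) := by
    simp only [PySem.List.sorted2, PySem.List.sorted, Bool.false_eq_true, if_false]
    have hfun : (fun (a b : Int × Int) => decide (a.1 < b.1) || (!decide (b.1 < a.1) && decide (a.2 < b.2)))
        = (fun (a b : Int × Int) => decide (toLex a < toLex b)) := by
      funext p q
      by_cases h1 : p.1 < q.1 <;> by_cases h2 : q.1 < p.1 <;> by_cases h3 : p.2 < q.2 <;>
        simp [Prod.Lex.lt_iff, h1, h2, h3] <;> omega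
    rw [hfun]
  rw [hkey]
  refine PySem.List.sorted_eq_of_perm_of_pairwise_lt xs ys _ h ?_
  refine hp.imp ?_
  intro p q hpq
  rw [Prod.Lex.lt_iff]
  simpa using hpq

lemma bform_pairwise (a b : List Char) (k : Int) (mm : Option Int) :
    (pvBform a b k mm).Pairwise (fun p q => p.1 < q.1 ∨ (p.1 = q.1 ∧ p.2 < q.2)) := by
  unfold pvBform pvRng
  rw [List.pairwise_flatMap]
  constructor
  · intro i _
    refine List.Pairwise.map _ (fun y1 y2 hlt => Or.inr ⟨rfl, hlt⟩) ?_
    exact (PySem.List.pairwise_lt_pyRange_one 0 _).filter _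
  · refine (PySem.List.pairwise_lt_pyRange_one 0 _).imp ?_
    intro x y hxy p hp q hq
    obtain ⟨u, -, hu⟩ := List.mem_map.mp hp
    obtain ⟨v, -, hv⟩ := List.mem_map.mp hq
    left
    rw [← hu, ← hv]
    exact hxy

lemma bform_nodup (a b : List Char) (k : Int) (mm : Option Int) : (pvBform a b k mm).Nodup := by
  unfold pvBform pvRng
  exact nodup_pairs _ (fun x y => (x, y))
    (fun x y x' y' h => ⟨(Prod.mk.injEq ..).mp h |>.1, (Prod.mk.injEq ..).mp h |>.2⟩)
    (PySem.List.nodup_pyRange_one ..) (PySem.List.nodup_pyRange_one ..)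

lemma mem_bform (a b : List Char) (k : Int) (mm : Option Int) (x y : Int) :
    (x, y) ∈ pvBform a b k mm ↔
      x ∈ pvRng a k ∧ y ∈ pvRng b k ∧ pvKmer a k x = pvKmer b k y
        ∧ pvOk a b k mm (pvKmer a k x) = true := by
  unfold pvBform
  simp only [List.mem_flatMap, List.mem_map, List.mem_filter, Bool.and_eq_true, beq_iff_eq,
    Prod.mk.injEq]
  constructor
  · rintro ⟨i, hi, j, ⟨hj, hk, hok⟩, hx, hy⟩
    subst hx; subst hy
    exact ⟨hi, hj, hk, hok⟩
  · rintro ⟨hx, hy, hk, hok⟩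
    exact ⟨x, hx, y, ⟨hy, hk, hok⟩, rfl, rfl⟩

lemma cooked_eq (a b : List Char) (k : Int) (mm : Option Int) (sw : Bool) :
    PySem.List.sorted2
      ((pvRng (if sw then a else b) k).flatMap (fun j =>
        ((pvRng (if sw then b else a) k).filter (fun i =>
          pvKmer (if sw then b else a) k i == pvKmer (if sw then a else b) k j
            && pvOk (if sw then b else a) (if sw then a else b) k mm (pvKmer (if sw then a else b) k j))).map
          (fun i => if sw then (j, i) else (i, j))))
      (fun p => p.1) (fun p => p.2) = pvBform a b k mm := by
  cases sw with
  | false =>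
      simp only [if_false, Bool.false_eq_true]
      refine sorted2_pair_eq _ _ ?_ (bform_pairwise a b k mm)
      have hnd : ((pvRng b k).flatMap (fun j =>
          ((pvRng a k).filter (fun i => pvKmer a k i == pvKmer b k j
            && pvOk a b k mm (pvKmer b k j))).map (fun i => (i, j)))).Nodup := by
        unfold pvRng
        exact nodup_pairs _ (fun x y => (y, x))
          (fun x y x' y' h => ⟨(Prod.mk.injEq ..).mp h |>.2, (Prod.mk.injEq ..).mp h |>.1⟩)
          (PySem.List.nodup_pyRange_one ..) (PySem.List.nodup_pyRange_one ..)
      rw [List.perm_ext_iff_of_nodup (bform_nodup a b k mm) hnd]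
      rintro ⟨x, y⟩
      rw [mem_bform]
      simp only [List.mem_flatMap, List.mem_map, List.mem_filter, Bool.and_eq_true, beq_iff_eq,
        Prod.mk.injEq]
      constructor
      · rintro ⟨hx, hy, hk, hok⟩
        exact ⟨y, hy, x, ⟨hx, hk, hk ▸ hok⟩, rfl, rfl⟩
      · rintro ⟨j, hj, i, ⟨hi, hk, hok⟩, hx, hy⟩
        subst hx; subst hy
        exact ⟨hi, hj, hk, hk ▸ hok⟩
  | true =>
      simp only [if_true]
      refine sorted2_pair_eq _ _ ?_ (bform_pairwise a b k mm)
      have hnd : ((pvRng a k).flatMap (fun j =>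
          ((pvRng b k).filter (fun i => pvKmer b k i == pvKmer a k j
            && pvOk b a k mm (pvKmer a k j))).map (fun i => (j, i)))).Nodup := by
        unfold pvRng
        exact nodup_pairs _ (fun x y => (x, y))
          (fun x y x' y' h => ⟨(Prod.mk.injEq ..).mp h |>.1, (Prod.mk.injEq ..).mp h |>.2⟩)
          (PySem.List.nodup_pyRange_one ..) (PySem.List.nodup_pyRange_one ..)
      rw [List.perm_ext_iff_of_nodup (bform_nodup a b k mm) hnd]
      rintro ⟨x, y⟩
      rw [mem_bform]
      simp only [List.mem_flatMap, List.mem_map, List.mem_filter, Bool.and_eq_true, beq_iff_eq,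
        Prod.mk.injEq]
      constructor
      · rintro ⟨hx, hy, hk, hok⟩
        exact ⟨x, hx, y, ⟨hy, hk.symm, by rw [okP_comm]; exact hok⟩, rfl, rfl⟩
      · rintro ⟨j, hj, i, ⟨hi, hk, hok⟩, hx, hy⟩
        subst hx; subst hy
        exact ⟨hj, hi, hk.symm, by rw [← okP_comm]; exact hok⟩

-- ===== VERDICT (by name: the statement is the Claim_ definition above) =====
theorem find_seeds_spec : Claim_equal_find_seeds := by
  intro da db k mm _
  unfold Spec_find_seeds
  rw [B_eq]
  unfold find_seeds
  split
  · rw [pvFind_eq]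
    have := cooked_eq da.toList db.toList k mm false
    simpa using this
  · rw [pvFind_eq]
    have := cooked_eq da.toList db.toList k mm true
    simpa using this
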